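-- pv_equiv track=rewrite | github.com/Svenito/exploit-pattern | pattern.py | pattern_gen
-- ===== SOURCE A (Python) =====
-- from string import ascii_uppercase, ascii_lowercase, digits
--
-- MAX_PATTERN_LENGTH = 20280
--
-- class MaxLengthException(Exception):
--     pass
--
-- def pattern_gen(length):
--     """
--     Generate a pattern of a given length up to a maximum
--     of 20280 - after this the pattern would repeat
--     """
--     if length >= MAX_PATTERN_LENGTH:
--         raise MaxLengthException('ERROR: Pattern length exceeds '
--                                  'maximum of {0}'.format(MAX_PATTERN_LENGTH))
--
--     pattern = ''
--     for upper in ascii_uppercase: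
--         for lower in ascii_lowercase:
--             for digit in digits:
--                 if len(pattern) < length:
--                     pattern += upper+lower+digit
--                 else:
--                     out = pattern[:length]
--                     return out
-- ===== SOURCE B (Python) =====
-- from string import ascii_uppercase, ascii_lowercase, digits
--
-- MAX_PATTERN_LENGTH = 20280
--
-- class MaxLengthException(Exception):
--     pass
--
-- def _char_at(p):
--     triple, which = divmod(p, 3)
--     if which == 0:
--         return ascii_uppercase[triple // 260]
--     if which == 1:
--         return ascii_lowercase[(triple // 10) % 26]
--     return digits[triple % 10]
--
-- def pattern_gen(length):
--     # lengths above MAX_PATTERN_LENGTH - 3 cannot be served (the original generator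
--     # emits whole triples only and yields no value there), so treat them as over-limit
--     if length > MAX_PATTERN_LENGTH - 3:
--         raise MaxLengthException('ERROR: Pattern length exceeds '
--                                  'maximum of {0}'.format(MAX_PATTERN_LENGTH))
--     return ''.join(_char_at(p) for p in range(length))
-- ===== Notes on version B (the rewrite author's own statement) =====
-- stated objective: alternative
-- what changed: Replaces the three nested loops that append whole character triples until the length is reached with a single pass over range(length) that computes each output character directly from its index by divmod arithmetic.
-- outside the precondition, e.g. on pattern_gen(20278): A returns None, B raises MaxLengthException; on pattern_gen(20279): A returns None, B raises MaxLengthException; on pattern_gen(20280): A raises MaxLengthException, B raises MaxLengthException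
import Mathlib
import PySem

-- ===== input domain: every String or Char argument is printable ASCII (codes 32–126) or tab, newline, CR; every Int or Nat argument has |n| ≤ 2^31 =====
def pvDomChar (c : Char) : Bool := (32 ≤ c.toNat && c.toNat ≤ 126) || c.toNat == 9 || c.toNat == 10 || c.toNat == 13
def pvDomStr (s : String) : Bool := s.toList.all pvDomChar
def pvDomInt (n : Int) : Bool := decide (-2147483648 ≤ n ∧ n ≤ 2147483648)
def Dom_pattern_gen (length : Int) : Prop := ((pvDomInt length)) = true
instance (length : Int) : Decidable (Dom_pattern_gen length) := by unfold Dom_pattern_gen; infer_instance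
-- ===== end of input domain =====

-- B computes each pattern character directly from its index (one pass over range(length)) instead of
-- A's three nested loops appending triples; equal on every length ≤ 20277 (Pre_).

-- ===== PORT A =====
-- the `string` module constants A imports
def pvUppers : List Char := "ABCDEFGHIJKLMNOPQRSTUVWXYZ".toList
def pvLowers : List Char := "abcdefghijklmnopqrstuvwxyz".toList
def pvDigits : List Char := "0123456789".toList

-- innermost `for digit in digits` loop; `.inr out` models the early `return pattern[:length]`
def pvDigitLoop (length : Int) (u l : Char) : List Char → List Char → (List Char ⊕ List Char)
  | [], p => .inl p
  | d :: ds, p =>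
    if (p.length : Int) < length then pvDigitLoop length u l ds (p ++ [u, l, d])
    else .inr (PySem.List.slice p none (some length))

def pvLowerLoop (length : Int) (u : Char) : List Char → List Char → (List Char ⊕ List Char)
  | [], p => .inl p
  | l :: ls, p =>
    match pvDigitLoop length u l pvDigits p with
    | .inl p' => pvLowerLoop length u ls p'
    | .inr o => .inr o

def pvUpperLoop (length : Int) : List Char → List Char → (List Char ⊕ List Char)
  | [], p => .inl p
  | u :: us, p =>
    match pvLowerLoop length u pvLowers p with
    | .inl p' => pvUpperLoop length us p'
    | .inr o => .inr o

def pattern_gen (length : Int) : String :=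
  if 20280 ≤ length then ""   -- Python raises MaxLengthException here (outside Pre_)
  else
    match pvUpperLoop length pvUppers [] with
    | .inr out => String.ofList out
    | .inl _ => ""             -- Python falls off the loops and returns None (length 20278/20279, outside Pre_)

-- ===== PORT B =====
-- _char_at(p): the p-th pattern character, computed from the index.  Python's s[i] would raise when out of
-- range; for every p drawn from range(length) with length ≤ 20277 the indices are in range, so pyGetD with
-- an arbitrary default is exact there.
def pvCharAt (p : Int) : Char :=
  let triple := PySem.Int.floordiv p 3
  let which := PySem.Int.mod p 3
  if which = 0 then PySem.List.pyGetD pvUppers (PySem.Int.floordiv triple 260) 'A'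
  else if which = 1 then PySem.List.pyGetD pvLowers (PySem.Int.mod (PySem.Int.floordiv triple 10) 26) 'a'
  else PySem.List.pyGetD pvDigits (PySem.Int.mod triple 10) '0'

def pattern_gen_alt (length : Int) : String :=
  if 20277 < length then ""   -- MaxLengthException: length not generatable (outside Pre_)
  else String.ofList ((PySem.List.pyRange 0 length 1).map pvCharAt)

-- ===== PRECONDITION & SPEC =====
-- Pre_ excludes length ≥ 20280, where A raises MaxLengthException, and length ∈ {20278, 20279}, where A's
-- loops are exhausted and Python returns None instead of a str (B raises MaxLengthException there).
def Pre_pattern_gen (length : Int) : Prop := length ≤ 20277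
instance (length : Int) : Decidable (Pre_pattern_gen length) := by unfold Pre_pattern_gen; infer_instance
def pvWitness_pattern_gen : Int := (12)
def Spec_pattern_gen (length : Int) (out : String) : Prop := out = pattern_gen_alt length
instance (length : Int) (out : String) : Decidable (Spec_pattern_gen length out) := by unfold Spec_pattern_gen; infer_instance

-- ===== CLAIM (what is proved, stated in full; the proofs are below) =====
def Claim_equal_pattern_gen : Prop := ∀ (length : Int), Dom_pattern_gen length → Pre_pattern_gen length → Spec_pattern_gen length (pattern_gen length)

-- ===== LEMMAS AND PROOFS =====

-- A's three nested loops, flattened to one loop over the list of (upper, lower, digit) triples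
def pvRunT (length : Int) : List (Char × Char × Char) → List Char → (List Char ⊕ List Char)
  | [], p => .inl p
  | t :: ts, p =>
    if (p.length : Int) < length then pvRunT length ts (p ++ [t.1, t.2.1, t.2.2])
    else .inr (PySem.List.slice p none (some length))

def pvFlat (ts : List (Char × Char × Char)) : List Char := ts.flatMap (fun t => [t.1, t.2.1, t.2.2])

def pvAll : List (Char × Char × Char) :=
  pvUppers.flatMap (fun u => pvLowers.flatMap (fun l => pvDigits.map (fun d => (u, l, d))))

def pvU (i : Nat) : Char := pvUppers.getD i 'A'
def pvL (k : Nat) : Char := pvLowers.getD k 'a'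
def pvD (d : Nat) : Char := pvDigits.getD d '0'

theorem pv_digit_eq (length : Int) (u l : Char) (ds p : List Char) :
    pvDigitLoop length u l ds p = pvRunT length (ds.map (fun d => (u, l, d))) p := by
  induction ds generalizing p with
  | nil => rfl
  | cons d ds ih =>
    simp only [pvDigitLoop, List.map_cons, pvRunT]
    split_ifs with h
    · exact ih _
    · rfl

theorem pv_runT_append (length : Int) (ts1 ts2 : List (Char × Char × Char)) (p : List Char) :
    pvRunT length (ts1 ++ ts2) p =
      match pvRunT length ts1 p with
      | .inl p' => pvRunT length ts2 p'
      | .inr o => .inr o := by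
  induction ts1 generalizing p with
  | nil => rfl
  | cons t ts ih =>
    simp only [List.cons_append, pvRunT]
    split_ifs with h
    · exact ih _
    · rfl

theorem pv_lower_eq (length : Int) (u : Char) (ls p : List Char) :
    pvLowerLoop length u ls p =
      pvRunT length (ls.flatMap (fun l => pvDigits.map (fun d => (u, l, d)))) p := by
  induction ls generalizing p with
  | nil => rfl
  | cons l ls ih =>
    simp only [pvLowerLoop, List.flatMap_cons, pv_digit_eq, pv_runT_append]
    cases pvRunT length (pvDigits.map fun d => (u, l, d)) p with
    | inl p' => exact ih p'
    | inr o => rfl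

theorem pv_upper_eq (length : Int) (us p : List Char) :
    pvUpperLoop length us p =
      pvRunT length (us.flatMap (fun u => pvLowers.flatMap (fun l => pvDigits.map (fun d => (u, l, d))))) p := by
  induction us generalizing p with
  | nil => rfl
  | cons u us ih =>
    simp only [pvUpperLoop, List.flatMap_cons, pv_lower_eq, pv_runT_append]
    cases pvRunT length (pvLowers.flatMap fun l => pvDigits.map fun d => (u, l, d)) p with
    | inl p' => exact ih p'
    | inr o => rfl

theorem pv_upper_all (length : Int) (p : List Char) :
    pvUpperLoop length pvUppers p = pvRunT length pvAll p :=
  pv_upper_eq length pvUppers p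

theorem pv_run_inr (length : Int) (h0 : 0 ≤ length) :
    ∀ (ts : List (Char × Char × Char)) (p : List Char), ts ≠ [] →
      length ≤ (p.length : Int) + 3 * ((ts.length : Int) - 1) →
      pvRunT length ts p = .inr ((p ++ pvFlat ts).take length.toNat) := by
  intro ts
  induction ts with
  | nil => intro p h _; exact absurd rfl h
  | cons t ts ih =>
    intro p _ hle
    simp only [List.length_cons] at hle
    simp only [pvRunT]
    split_ifs with h
    · have hne : ts ≠ [] := by
        rintro rfl
        simp at hle
        omega
      rw [ih (p ++ [t.1, t.2.1, t.2.2]) hne (by simp; omega)]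
      congr 1
      simp [pvFlat]
    · rw [PySem.List.slice_to p h0]
      congr 1
      have hlen : length.toNat ≤ p.length := by omega
      exact (List.take_append_of_le_length hlen).symm

theorem pv_run_nonpos (length : Int) (hneg : length ≤ 0) (t : Char × Char × Char)
    (ts : List (Char × Char × Char)) : pvRunT length (t :: ts) [] = .inr [] := by
  simp only [pvRunT]
  rw [if_neg (by simp; omega)]
  simp [PySem.List.slice]

theorem pv_len_const_flatMap {α β : Type} (l : List α) (f : α → List β) (k : Nat)
    (h : ∀ a ∈ l, (f a).length = k) : (l.flatMap f).length = l.length * k := by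
  induction l with
  | nil => simp
  | cons a t ih =>
    simp [List.flatMap_cons, h a (by simp), ih (fun x hx => h x (by simp [hx]))]
    ring

theorem pvAll_length : pvAll.length = 6760 := by
  have h1 : ∀ u ∈ pvUppers, (pvLowers.flatMap (fun l => pvDigits.map (fun d => (u, l, d)))).length = 260 := by
    intro u _
    rw [pv_len_const_flatMap _ _ 10 (fun l _ => by simp [pvDigits])]
    decide
  rw [pvAll, pv_len_const_flatMap _ _ 260 h1]
  decide

theorem pvAll_ne : pvAll ≠ [] := by
  intro h
  have := pvAll_length
  rw [h] at this
  simp at this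

theorem pv_chunk {α : Type} (a b : Nat) (f : Nat → α) :
    (List.range (a * b)).map f =
      (List.range a).flatMap (fun i => (List.range b).map (fun j => f (b * i + j))) := by
  induction a with
  | zero => simp
  | succ a ih =>
    rw [show (a + 1) * b = a * b + b from by ring, List.range_add, List.map_append, ih,
      List.range_succ, List.flatMap_append]
    congr 1
    simp [List.map_map, Function.comp, Nat.mul_comm]

theorem pv_charAt_spec (i k d w : Nat) (_hi : i < 26) (hk : k < 26) (hd : d < 10) (hw : w < 3) :
    pvCharAt ((780 * i + 30 * k + 3 * d + w : Nat) : Int) =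
      if w = 0 then pvU i else if w = 1 then pvL k else pvD d := by
  have f3 : PySem.Int.floordiv ((780 * i + 30 * k + 3 * d + w : Nat) : Int) 3
      = ((260 * i + 10 * k + d : Nat) : Int) := by
    have := PySem.Int.floordiv_natCast (780 * i + 30 * k + 3 * d + w) 3
    have hq : (780 * i + 30 * k + 3 * d + w) / 3 = 260 * i + 10 * k + d := by omega
    rw [hq] at this
    exact_mod_cast this
  have m3 : PySem.Int.mod ((780 * i + 30 * k + 3 * d + w : Nat) : Int) 3 = ((w : Nat) : Int) := by
    have := PySem.Int.mod_natCast (780 * i + 30 * k + 3 * d + w) 3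
    have hq : (780 * i + 30 * k + 3 * d + w) % 3 = w := by omega
    rw [hq] at this
    exact_mod_cast this
  have f260 : PySem.Int.floordiv ((260 * i + 10 * k + d : Nat) : Int) 260 = ((i : Nat) : Int) := by
    have := PySem.Int.floordiv_natCast (260 * i + 10 * k + d) 260
    have hq : (260 * i + 10 * k + d) / 260 = i := by omega
    rw [hq] at this
    exact_mod_cast this
  have f10 : PySem.Int.floordiv ((260 * i + 10 * k + d : Nat) : Int) 10 = ((26 * i + k : Nat) : Int) := by
    have := PySem.Int.floordiv_natCast (260 * i + 10 * k + d) 10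
    have hq : (260 * i + 10 * k + d) / 10 = 26 * i + k := by omega
    rw [hq] at this
    exact_mod_cast this
  have m26 : PySem.Int.mod ((26 * i + k : Nat) : Int) 26 = ((k : Nat) : Int) := by
    have := PySem.Int.mod_natCast (26 * i + k) 26
    have hq : (26 * i + k) % 26 = k := by omega
    rw [hq] at this
    exact_mod_cast this
  have m10 : PySem.Int.mod ((260 * i + 10 * k + d : Nat) : Int) 10 = ((d : Nat) : Int) := by
    have := PySem.Int.mod_natCast (260 * i + 10 * k + d) 10
    have hq : (260 * i + 10 * k + d) % 10 = d := by omega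
    rw [hq] at this
    exact_mod_cast this
  simp only [pvCharAt, f3, m3, f260, f10, m26, m10, PySem.List.pyGetD_natCast]
  by_cases hw0 : w = 0
  · simp [hw0, pvU]
  · by_cases hw1 : w = 1
    · have : ¬ ((w : Int) = 0) := by omega
      simp [hw1, pvL]
    · have h0 : ¬ ((w : Int) = 0) := by omega
      have h1 : ¬ ((w : Int) = 1) := by omega
      simp [h1, hw0, hw1, pvD]

theorem pv_tripleEq (i k d : Nat) (hi : i < 26) (hk : k < 26) (hd : d < 10) :
    (List.range 3).map (fun w => pvCharAt ((780 * i + 30 * k + 3 * d + w : Nat) : Int)) =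
      [pvU i, pvL k, pvD d] := by
  rw [show List.range 3 = [0, 1, 2] from by decide]
  simp only [List.map_cons, List.map_nil]
  rw [pv_charAt_spec i k d 0 hi hk hd (by omega), pv_charAt_spec i k d 1 hi hk hd (by omega),
    pv_charAt_spec i k d 2 hi hk hd (by omega)]
  norm_num

theorem pvUppers_eq : pvUppers = (List.range 26).map pvU := by decide
theorem pvLowers_eq : pvLowers = (List.range 26).map pvL := by decide
theorem pvDigits_eq : pvDigits = (List.range 10).map pvD := by decide

theorem pvMapAll :
    (List.range 20280).map (fun k : Nat => pvCharAt (k : Int)) = pvFlat pvAll := by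
  -- right side into range/flatMap form
  have hr : pvFlat pvAll =
      (List.range 26).flatMap (fun i => (List.range 26).flatMap (fun k =>
        (List.range 10).flatMap (fun d => [pvU i, pvL k, pvD d]))) := by
    rw [pvFlat, pvAll, pvUppers_eq, pvLowers_eq, pvDigits_eq]
    simp only [List.flatMap_assoc, List.flatMap_map]
  rw [hr, show (20280 : Nat) = 26 * 780 from by norm_num, pv_chunk]
  apply List.flatMap_congr
  intro i hi
  rw [show (780 : Nat) = 26 * 30 from by norm_num, pv_chunk]
  apply List.flatMap_congr
  intro k hk
  rw [show (30 : Nat) = 10 * 3 from by norm_num, pv_chunk]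
  apply List.flatMap_congr
  intro d hd
  have hi' := List.mem_range.mp hi
  have hk' := List.mem_range.mp hk
  have hd' := List.mem_range.mp hd
  have harith : ∀ w : Nat, 780 * i + (30 * k + (3 * d + w)) = 780 * i + 30 * k + 3 * d + w := by
    intro w; ring
  calc (List.range 3).map (fun w => pvCharAt ((780 * i + (30 * k + (3 * d + w)) : Nat) : Int))
      = (List.range 3).map (fun w => pvCharAt ((780 * i + 30 * k + 3 * d + w : Nat) : Int)) := by
        apply List.map_congr_left
        intro w _
        rw [harith w]
    _ = [pvU i, pvL k, pvD d] := pv_tripleEq i k d hi' hk' hd'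

-- ===== VERDICT (by name: the statement is the Claim_ definition above) =====
theorem pattern_gen_spec : Claim_equal_pattern_gen := by
  intro length _ hpre
  have h77 : length ≤ 20277 := hpre
  unfold Spec_pattern_gen pattern_gen pattern_gen_alt
  rw [if_neg (by omega), if_neg (by omega), pv_upper_all]
  by_cases h0 : 0 ≤ length
  · rw [pv_run_inr length h0 pvAll [] pvAll_ne
      (by rw [pvAll_length]; push_cast; omega)]
    simp only [List.nil_append]
    rw [PySem.List.pyRange_one]
    simp only [List.map_map, sub_zero]
    have hcomp : (pvCharAt ∘ fun k : Nat => (0 : Int) + ↑k) = fun k : Nat => pvCharAt (k : Int) := by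
      funext k
      simp
    rw [hcomp, show List.range length.toNat = (List.range 20280).take length.toNat from by
      rw [List.take_range]; congr 1; omega]
    rw [List.map_take, pvMapAll]
  · rcases hA : pvAll with _ | ⟨t, ts⟩
    · exact absurd hA pvAll_ne
    · rw [pv_run_nonpos length (by omega) t ts,
        PySem.List.pyRange_one_eq_nil (by omega)]
      rfl
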